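-- pv_equiv track=rewrite | github.com/BartekDomanowski/PPPD | Kolokwia/IAD-2023-kol1.py | suma_malych_iloczynow
-- ===== SOURCE A (Python) =====
-- def f(x):
--     return x
--
-- def suma_malych_iloczynow(n, X):
--     summ = 0
--     for i in range(1, n + 1):
--         summ += f(i)
--     answer = 0
--     max_j = n
--     for i in range(1, n + 1):
--         while f(i) * f(max_j) >= X and max_j >= 0: #Ta pętla łącznie wykona się maksymalnie n razy
--             summ -= f(max_j)
--             max_j -= 1
--         answer += summ * f(i)
--     return answer
-- ===== SOURCE B (Python) =====
-- def suma_malych_iloczynow(n, X):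
--     answer = 0
--     for i in range(1, n + 1):
--         m = (X - 1) // i
--         if m > n:
--             m = n
--         if m < 0:
--             m = 0
--         answer += i * m * (m + 1) // 2
--     return answer
-- ===== Notes on version B (the rewrite author's own statement) =====
-- stated objective: simpler
-- what changed: Replaced A's two-pass scheme (precomputed running sum plus a shared two-pointer while-loop decrementing max_j) by a single pass that computes each inner sum directly in closed form: m = clamp((X-1)//i, 0, n) and the term i*m*(m+1)//2.
import Mathlib
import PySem

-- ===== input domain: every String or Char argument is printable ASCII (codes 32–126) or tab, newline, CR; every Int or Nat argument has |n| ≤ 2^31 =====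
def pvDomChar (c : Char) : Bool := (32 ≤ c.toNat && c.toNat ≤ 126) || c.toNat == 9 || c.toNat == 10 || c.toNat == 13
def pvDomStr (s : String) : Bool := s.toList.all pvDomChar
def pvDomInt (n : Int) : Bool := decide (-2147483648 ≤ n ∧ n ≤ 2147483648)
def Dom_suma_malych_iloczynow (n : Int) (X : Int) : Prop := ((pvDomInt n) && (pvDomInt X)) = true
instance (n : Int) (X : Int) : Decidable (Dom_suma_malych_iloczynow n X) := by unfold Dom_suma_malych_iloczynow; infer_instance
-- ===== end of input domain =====

-- B replaces A's shared two-pointer while-loop and running sum by a per-i closed form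
-- m = clamp((X-1)//i, 0, n), term i*m*(m+1)//2; single pass, same O(n), smaller constant.

-- ===== PORT A =====
def f (x : Int) : Int := x

-- Python's inner `while f(i)*f(max_j) >= X and max_j >= 0: summ -= f(max_j); max_j -= 1`
def innerA (X i : Int) (summ maxj : Int) : Int × Int :=
  if i * maxj ≥ X ∧ maxj ≥ 0 then innerA X i (summ - f maxj) (maxj - 1) else (summ, maxj)
termination_by (maxj + 1).toNat
decreasing_by omega

-- one iteration of Python's second `for i` loop, state (summ, max_j, answer)
def stepA (X : Int) (st : Int × Int × Int) (i : Int) : Int × Int × Int :=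
  let p := innerA X i st.1 st.2.1
  (p.1, p.2, st.2.2 + p.1 * f i)

def suma_malych_iloczynow (n : Int) (X : Int) : Int :=
  let summ := (PySem.List.pyRange 1 (n + 1)).foldl (fun s i => s + f i) 0
  ((PySem.List.pyRange 1 (n + 1)).foldl (stepA X) (summ, n, 0)).2.2

-- ===== PORT B =====
-- one iteration of Source B's loop body
def stepB (n X : Int) (answer i : Int) : Int :=
  let m0 := PySem.Int.floordiv (X - 1) i
  let m1 := if m0 > n then n else m0
  let m2 := if m1 < 0 then 0 else m1
  answer + PySem.Int.floordiv (i * m2 * (m2 + 1)) 2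

def suma_malych_iloczynow_alt (n : Int) (X : Int) : Int :=
  (PySem.List.pyRange 1 (n + 1)).foldl (stepB n X) 0

-- ===== PRECONDITION & SPEC =====
def Spec_suma_malych_iloczynow (n : Int) (X : Int) (out : Int) : Prop := out = suma_malych_iloczynow_alt n X
instance (n : Int) (X : Int) (out : Int) : Decidable (Spec_suma_malych_iloczynow n X out) := by unfold Spec_suma_malych_iloczynow; infer_instance

-- ===== CLAIM (what is proved, stated in full; the proofs are below) =====
def Claim_equal_suma_malych_iloczynow : Prop := ∀ (n : Int) (X : Int), Dom_suma_malych_iloczynow n X → Spec_suma_malych_iloczynow n X (suma_malych_iloczynow n X)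

-- ===== LEMMAS AND PROOFS =====

lemma le_or_lt_int (a b : Int) : a ≤ b ∨ b < a := by omega

-- triangular number 1 + 2 + … + m (0 for m ≤ 0)
def sumTo (m : Int) : Int := if m ≤ 0 then 0 else m + sumTo (m - 1)
termination_by m.toNat
decreasing_by omega

lemma sumTo_nonpos {m : Int} (h : m ≤ 0) : sumTo m = 0 := by rw [sumTo]; simp [h]

lemma sumTo_sub {m : Int} (h : 0 ≤ m) : sumTo m - m = sumTo (m - 1) := by
  rcases eq_or_lt_of_le h with h0 | h0
  · rw [← h0]; simp [sumTo_nonpos]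
  · rw [sumTo]; simp [not_le.mpr h0]

lemma two_mul_sumTo_nat (k : Nat) : 2 * sumTo (k : Int) = (k : Int) * ((k : Int) + 1) := by
  induction k with
  | zero => simp [sumTo_nonpos]
  | succ k ih =>
    rw [sumTo]
    have h : ¬ ((k + 1 : Nat) : Int) ≤ 0 := by push_cast; omega
    rw [if_neg h, show ((k + 1 : Nat) : Int) - 1 = (k : Int) by push_cast; ring]
    push_cast
    push_cast at ih
    linear_combination ih

lemma two_mul_sumTo {m : Int} (h : 0 ≤ m) : 2 * sumTo m = m * (m + 1) := by
  have := two_mul_sumTo_nat m.toNat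
  rwa [Int.toNat_of_nonneg h] at this

lemma term_eq {m : Int} (i : Int) (h : 0 ≤ m) :
    PySem.Int.floordiv (i * m * (m + 1)) 2 = sumTo m * i := by
  have h2 : i * m * (m + 1) = 2 * (sumTo m * i) := by
    have := two_mul_sumTo h
    linear_combination (-i) * this
  rw [h2, PySem.Int.floordiv_eq_ediv_of_pos (by norm_num)]
  exact Int.mul_ediv_cancel_left _ (by norm_num)

-- the value max_j settles at after the inner while-loop, when entered at M
def pvG (X i M : Int) : Int := if 0 < X then min M (PySem.Int.floordiv (X - 1) i) else -1

lemma fdiv_nonneg' {a i : Int} (ha : 0 ≤ a) (hi : 1 ≤ i) : 0 ≤ PySem.Int.floordiv a i :=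
  (PySem.Int.le_floordiv_iff_mul_le (by omega)).mpr (by simpa using ha)

lemma pvG_neg_one {X i : Int} (hi : 1 ≤ i) : pvG X i (-1) = -1 := by
  unfold pvG
  split_ifs with hX
  · have := fdiv_nonneg' (a := X - 1) (by omega) hi
    omega
  · rfl

lemma pvG_ge {X i M : Int} (hi : 1 ≤ i) (hM : -1 ≤ M) : -1 ≤ pvG X i M := by
  unfold pvG
  split_ifs with hX
  · have := fdiv_nonneg' (a := X - 1) (by omega) hi
    omega
  · omega

lemma pvG_step {X i M : Int} (hi : 1 ≤ i) (_hM : 0 ≤ M) (h : i * M ≥ X) :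
    pvG X i M = pvG X i (M - 1) := by
  unfold pvG
  split_ifs with hX
  · have hv : PySem.Int.floordiv (X - 1) i < M :=
      (PySem.Int.floordiv_lt_iff_lt_mul (by omega)).mpr (by nlinarith)
    omega
  · rfl

lemma pvG_id {X i M : Int} (hi : 1 ≤ i) (hM : 0 ≤ M) (h : ¬ i * M ≥ X) :
    pvG X i M = M := by
  have hX : 0 < X := by nlinarith
  have hv : M ≤ PySem.Int.floordiv (X - 1) i :=
    (PySem.Int.le_floordiv_iff_mul_le (by omega)).mpr (by nlinarith)
  unfold pvG
  rw [if_pos hX]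
  omega

lemma innerA_spec (X i : Int) (hi : 1 ≤ i) :
    ∀ (k : Nat) (M : Int), -1 ≤ M → (M + 1).toNat = k →
      innerA X i (sumTo M) M = (sumTo (pvG X i M), pvG X i M) := by
  intro k
  induction k with
  | zero =>
    intro M hM hk
    have hM1 : M = -1 := by omega
    subst hM1
    rw [innerA.eq_def, if_neg (by omega), pvG_neg_one hi]
  | succ k ih =>
    intro M _ hk
    have hM0 : 0 ≤ M := by omega
    by_cases h : i * M ≥ X
    · rw [innerA.eq_def, if_pos ⟨h, by omega⟩]
      have hs : sumTo M - f M = sumTo (M - 1) := by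
        simpa [f] using sumTo_sub hM0
      rw [hs, ih (M - 1) (by omega) (by omega), pvG_step hi hM0 h]
    · rw [innerA.eq_def, if_neg (by omega), pvG_id hi hM0 h]

-- the first Python loop computes the triangular number
lemma first_loop_nat (k : Nat) :
    (PySem.List.pyRange 1 ((k : Int) + 1)).foldl (fun s i => s + f i) 0 = sumTo (k : Int) := by
  induction k with
  | zero => simp [PySem.List.pyRange_one_eq_nil, sumTo_nonpos]
  | succ k ih =>
    have h : ((k + 1 : Nat) : Int) = (k : Int) + 1 := by push_cast; ring
    rw [h, PySem.List.pyRange_one_succ_right (by omega), List.foldl_append, ih]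
    simp only [List.foldl_cons, List.foldl_nil, f]
    have h2 : sumTo ((k : Int) + 1) - ((k : Int) + 1) = sumTo (k : Int) := by
      simpa using sumTo_sub (m := (k : Int) + 1) (by omega)
    omega

lemma first_loop (n : Int) :
    (PySem.List.pyRange 1 (n + 1)).foldl (fun s i => s + f i) 0 = sumTo n := by
  rcases le_or_lt_int n 0 with h | h
  · rw [PySem.List.pyRange_one_eq_nil (by omega), sumTo_nonpos h]; rfl
  · have := first_loop_nat n.toNat
    rwa [Int.toNat_of_nonneg (by omega)] at this

-- floor division by a larger positive divisor is smaller (for a nonneg dividend)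
lemma fdiv_mono {a i : Int} (ha : 0 ≤ a) (hi : 1 ≤ i) :
    PySem.Int.floordiv a (i + 1) ≤ PySem.Int.floordiv a i := by
  set q := PySem.Int.floordiv a (i + 1) with hq
  have hq0 : 0 ≤ q := fdiv_nonneg' ha (by omega)
  have h1 : q * (i + 1) ≤ a := (PySem.Int.le_floordiv_iff_mul_le (by omega)).mp le_rfl
  exact (PySem.Int.le_floordiv_iff_mul_le (by omega)).mpr (by nlinarith)

-- max_j after processing i = 1 … k (k ≥ 1), starting from n
def pvM (n X : Int) (k : Nat) : Int := if k = 0 then n else pvG X (k : Int) n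

lemma pvM_ge {n X : Int} (hn : 1 ≤ n) (k : Nat) : -1 ≤ pvM n X k := by
  unfold pvM
  split_ifs with h
  · omega
  · exact pvG_ge (by omega) (by omega)

lemma pvM_step {n X : Int} (_hn : 1 ≤ n) (k : Nat) :
    pvG X ((k : Int) + 1) (pvM n X k) = pvM n X (k + 1) := by
  unfold pvM
  rcases Nat.eq_zero_or_pos k with h0 | h0
  · subst h0; simp
  · rw [if_neg (by omega), if_neg (by omega),
        show ((k + 1 : Nat) : Int) = (k : Int) + 1 by push_cast; ring]
    unfold pvG
    split_ifs with hX
    · have := fdiv_mono (a := X - 1) (by omega) (i := (k : Int)) (by omega)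
      omega
    · rfl

-- B's loop-body term equals A's contribution summ' * i
lemma term_match {n X i : Int} (hn : 1 ≤ n) (hi : 1 ≤ i) (ans : Int) :
    stepB n X ans i = ans + sumTo (pvG X i n) * i := by
  unfold stepB pvG
  dsimp only
  by_cases hX : 0 < X
  · have hv0 : 0 ≤ PySem.Int.floordiv (X - 1) i := fdiv_nonneg' (by omega) hi
    rw [if_pos hX]
    by_cases h1 : PySem.Int.floordiv (X - 1) i > n
    · rw [if_pos h1, if_neg (by omega),
          show min n (PySem.Int.floordiv (X - 1) i) = n by omega, term_eq i (by omega)]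
    · rw [if_neg h1, if_neg (by omega),
          show min n (PySem.Int.floordiv (X - 1) i) = PySem.Int.floordiv (X - 1) i by omega,
          term_eq i hv0]
  · have hv0 : PySem.Int.floordiv (X - 1) i < 0 :=
      (PySem.Int.floordiv_lt_iff_lt_mul (by omega)).mpr (by omega)
    rw [if_neg hX,
        show (if PySem.Int.floordiv (X - 1) i > n then n else PySem.Int.floordiv (X - 1) i)
          = PySem.Int.floordiv (X - 1) i from if_neg (by omega),
        if_pos hv0, sumTo_nonpos (by omega),
        show i * 0 * (0 + 1) = 0 by ring, PySem.Int.floordiv_eq_ediv_of_pos (by norm_num)]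
    simp

-- the outer loops agree step by step
lemma outer {n X : Int} (hn : 1 ≤ n) :
    ∀ (k : Nat), (k : Int) ≤ n →
      (PySem.List.pyRange 1 ((k : Int) + 1)).foldl (stepA X) (sumTo n, n, 0)
        = (sumTo (pvM n X k), pvM n X k,
           (PySem.List.pyRange 1 ((k : Int) + 1)).foldl (stepB n X) 0) := by
  intro k
  induction k with
  | zero => simp [PySem.List.pyRange_one_eq_nil, pvM]
  | succ k ih =>
    intro hk
    have hk' : (k : Int) ≤ n := by push_cast at hk ⊢; omega
    have hcast : ((k + 1 : Nat) : Int) = (k : Int) + 1 := by push_cast; ring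
    rw [hcast, PySem.List.pyRange_one_succ_right (by omega), List.foldl_append,
        List.foldl_append, ih hk']
    have hstep := innerA_spec X ((k : Int) + 1) (by omega)
        ((pvM n X k) + 1).toNat (pvM n X k) (pvM_ge hn k) rfl
    simp only [List.foldl_cons, List.foldl_nil]
    rw [show stepA X (sumTo (pvM n X k), pvM n X k,
          (PySem.List.pyRange 1 ((k : Int) + 1)).foldl (stepB n X) 0) ((k : Int) + 1)
        = (sumTo (pvG X ((k : Int) + 1) (pvM n X k)), pvG X ((k : Int) + 1) (pvM n X k),
           (PySem.List.pyRange 1 ((k : Int) + 1)).foldl (stepB n X) 0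
             + sumTo (pvG X ((k : Int) + 1) (pvM n X k)) * ((k : Int) + 1)) from by
      unfold stepA; rw [hstep]; simp [f]]
    rw [pvM_step hn k, term_match hn (by omega)]
    rw [show pvM n X (k + 1) = pvG X ((k : Int) + 1) n from by
      unfold pvM; rw [if_neg (by omega), show ((k + 1 : Nat) : Int) = (k : Int) + 1 by push_cast; ring]]

-- ===== VERDICT (by name: the statement is the Claim_ definition above) =====
theorem suma_malych_iloczynow_spec : Claim_equal_suma_malych_iloczynow := by
  intro n X _
  unfold Spec_suma_malych_iloczynow suma_malych_iloczynow suma_malych_iloczynow_alt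
  rcases le_or_lt_int n 0 with h | h
  · rw [PySem.List.pyRange_one_eq_nil (by omega)]; rfl
  · rw [first_loop]
    have := outer (X := X) (by omega : 1 ≤ n) n.toNat (by omega)
    rw [Int.toNat_of_nonneg (by omega)] at this
    dsimp only
    rw [this]
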